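-- pv_equiv track=rewrite | github.com/JunmoJeong/algorithms | 파이썬 1급 모의고사 2차 정답(코드)/2차 1급 10_solution_code.py | solution
-- ===== SOURCE A (Python) =====
-- def solution(s):
--     s += '#'
--     answer = ""
--     for i in range(len(s)):
--         if s[i] == '0' and s[i + 1] != '0':
--             answer += '0'
--         elif s[i] == '1':
--             answer += '1'
--     return answer
-- ===== SOURCE B (Python) =====
-- def solution(s):
--     pieces = []
--     i = 0
--     n = len(s)
--     while i < n:
--         c = s[i]
--         j = i
--         while j < n and s[j] == c:
--             j += 1
--         if c == '1':
--             pieces.append('1' * (j - i))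
--         elif c == '0':
--             pieces.append('0')
--         i = j
--     return "".join(pieces)
-- ===== Notes on version B (the rewrite author's own statement) =====
-- stated objective: alternative
-- what changed: B walks maximal runs of identical characters (no '#' sentinel, no per-index lookahead): a '1'-run is emitted whole, a '0'-run collapses to one '0', any other run is skipped, and the pieces are joined once instead of repeated string concatenation.
import Mathlib
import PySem

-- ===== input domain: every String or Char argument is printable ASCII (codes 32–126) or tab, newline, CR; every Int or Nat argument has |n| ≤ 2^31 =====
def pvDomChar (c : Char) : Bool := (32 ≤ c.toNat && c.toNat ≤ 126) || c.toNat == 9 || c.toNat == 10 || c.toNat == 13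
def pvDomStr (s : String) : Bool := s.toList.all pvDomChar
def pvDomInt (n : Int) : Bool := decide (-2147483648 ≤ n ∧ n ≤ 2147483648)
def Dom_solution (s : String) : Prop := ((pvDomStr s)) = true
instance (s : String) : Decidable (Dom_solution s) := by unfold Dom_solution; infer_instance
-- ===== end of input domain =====

-- B replaces A's '#'-sentinel + per-index lookahead by a run-based scan (maximal runs of
-- equal characters): a '1'-run is emitted whole, a '0'-run collapses to one '0', other runs
-- are skipped; pieces are joined once instead of repeated string concatenation (objective: alternative).

-- ===== PORT A =====
-- A appends the sentinel '#' and scans index by index, looking one character ahead.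
-- Ported as recursion exposing the current character and the next one; in the one-element
-- case the remaining character is always the appended sentinel '#' (so only the '1' branch
-- of the Python could fire there).
def solAuxA : List Char → List Char
  | c :: d :: rest =>
      (if c = '0' ∧ d ≠ '0' then ['0'] else if c = '1' then ['1'] else []) ++ solAuxA (d :: rest)
  | [c] => if c = '1' then ['1'] else []
  | [] => []

def solution (s : String) : String :=
  String.mk (solAuxA (s.toList ++ ['#']))

-- ===== PORT B =====
-- Source B's outer while loop over run starts; the inner `while s[j] == c` scan is the
-- takeWhile/dropWhile split of the rest, and '1' * (j - i) is the replicate.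
def solAuxB : List Char → List Char
  | [] => []
  | c :: rest =>
      (if c = '1' then '1' :: List.replicate (rest.takeWhile (· == c)).length '1'
       else if c = '0' then ['0'] else [])
      ++ solAuxB (rest.dropWhile (· == c))
termination_by l => l.length
decreasing_by
  simpa using Nat.lt_succ_of_le (List.length_dropWhile_le _ _)

def solution_alt (s : String) : String :=
  String.mk (solAuxB s.toList)

-- ===== PRECONDITION & SPEC =====
def Spec_solution (s : String) (out : String) : Prop := out = solution_alt s
instance (s : String) (out : String) : Decidable (Spec_solution s out) := by unfold Spec_solution; infer_instance

-- ===== CLAIM (what is proved, stated in full; the proofs are below) =====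
def Claim_equal_solution : Prop := ∀ (s : String), Dom_solution s → Spec_solution s (solution s)

-- ===== LEMMAS AND PROOFS =====

theorem head?_dropWhile_not {α : Type} (p : α → Bool) (l : List α) (a : α)
    (h : (l.dropWhile p).head? = some a) : ¬ p a = true := by
  induction l with
  | nil => simp at h
  | cons x xs ih =>
    by_cases hx : p x
    · rw [List.dropWhile_cons_of_pos hx] at h; exact ih h
    · rw [List.dropWhile_cons_of_neg hx] at h
      simp at h; simpa [← h] using hx

theorem solAuxA_ones (k : ℕ) (r : List Char) (hr : r ≠ []) :
    solAuxA (List.replicate k '1' ++ r) = List.replicate k '1' ++ solAuxA r := by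
  induction k with
  | zero => simp
  | succ k ih =>
    obtain ⟨d, rest, hd⟩ := List.exists_cons_of_ne_nil
      (show List.replicate k '1' ++ r ≠ [] by simp [hr])
    rw [List.replicate_succ, List.cons_append, hd, solAuxA, ← hd, ih]
    simp

theorem solAuxA_zeros (k : ℕ) (r : List Char)
    (h0 : ∀ a, r.head? = some a → a ≠ '0') (hr : r ≠ []) :
    solAuxA (List.replicate (k + 1) '0' ++ r) = '0' :: solAuxA r := by
  induction k with
  | zero =>
    obtain ⟨d, rest, hd⟩ := List.exists_cons_of_ne_nil hr
    have hd0 : d ≠ '0' := h0 d (by rw [hd]; rfl)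
    rw [hd]
    simp [solAuxA, hd0]
  | succ k ih =>
    rw [List.replicate_succ, List.cons_append]
    obtain ⟨d, rest, hd⟩ := List.exists_cons_of_ne_nil
      (show List.replicate (k + 1) '0' ++ r ≠ [] by simp)
    have hd1 : d = '0' := by
      have := congrArg List.head? hd
      simpa [List.replicate_succ] using this.symm
    rw [hd, solAuxA, ← hd, ih]
    simp [hd1]

theorem solAuxA_other (c : Char) (hc0 : c ≠ '0') (hc1 : c ≠ '1') (k : ℕ) (r : List Char)
    (hr : r ≠ []) :
    solAuxA (List.replicate k c ++ r) = solAuxA r := by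
  induction k with
  | zero => simp
  | succ k ih =>
    obtain ⟨d, rest, hd⟩ := List.exists_cons_of_ne_nil
      (show List.replicate k c ++ r ≠ [] by simp [hr])
    rw [List.replicate_succ, List.cons_append, hd, solAuxA, ← hd, ih]
    simp [hc0, hc1]

theorem solAux_key : ∀ (n : ℕ) (l : List Char), l.length ≤ n →
    solAuxA (l ++ ['#']) = solAuxB l := by
  intro n
  induction n with
  | zero =>
    intro l hl
    have : l = [] := List.eq_nil_of_length_eq_zero (Nat.le_zero.mp hl)
    subst this; simp [solAuxA, solAuxB]
  | succ n ih =>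
    intro l hl
    match l with
    | [] => simp [solAuxA, solAuxB]
    | c :: rest =>
      have hsplit : rest.takeWhile (· == c) ++ rest.dropWhile (· == c) = rest :=
        List.takeWhile_append_dropWhile
      have hrun : ∀ a ∈ rest.takeWhile (· == c), a = c := by
        intro a ha
        simpa using List.mem_takeWhile_imp ha
      have hrunrep : rest.takeWhile (· == c)
          = List.replicate (rest.takeWhile (· == c)).length c :=
        List.eq_replicate_length.mpr hrun
      have hlen : (rest.dropWhile (· == c)).length ≤ n := by
        have h1 := List.length_dropWhile_le (· == c) rest
        have h2 : rest.length ≤ n := by simpa using hl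
        omega
      have hIH := ih (rest.dropWhile (· == c)) hlen
      have hne : rest.dropWhile (· == c) ++ ['#'] ≠ [] := by simp
      have hshape : (c :: rest) ++ ['#']
          = List.replicate ((rest.takeWhile (· == c)).length + 1) c
            ++ (rest.dropWhile (· == c) ++ ['#']) := by
        rw [List.replicate_succ, ← hrunrep]
        simp only [List.cons_append]
        rw [← List.append_assoc, hsplit]
      rw [hshape]
      by_cases hc1 : c = '1'
      · subst hc1
        rw [solAuxA_ones _ _ hne, hIH, solAuxB]
        simp [List.replicate_succ]
      · by_cases hc0 : c = '0'
        · subst hc0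
          have hhead : ∀ a, (rest.dropWhile (· == '0') ++ ['#']).head? = some a → a ≠ '0' := by
            intro a ha
            match hdw : rest.dropWhile (· == '0') with
            | [] => rw [hdw] at ha; simp at ha; rw [← ha]; decide
            | d :: rest' =>
              rw [hdw] at ha; simp at ha
              have := head?_dropWhile_not (· == '0') rest d (by rw [hdw]; rfl)
              simp at this; exact ha ▸ this
          rw [solAuxA_zeros _ _ hhead hne, hIH, solAuxB]
          simp
        · rw [solAuxA_other c hc0 hc1 _ _ hne, hIH, solAuxB]
          simp [hc0, hc1]

-- ===== VERDICT (by name: the statement is the Claim_ definition above) =====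
theorem solution_spec : Claim_equal_solution := by
  intro s _
  unfold Spec_solution solution solution_alt
  rw [solAux_key s.toList.length s.toList (le_refl _)]
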